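-- pv_equiv track=rewrite | github.com/nathanladner-cell/liamaivision | rag/web_chat_cloud.py | extract_active_context
-- ===== SOURCE A (Python) =====
-- def extract_active_context(conversation_history):
--     """Extract the active context that should be inherited"""
--     active_context = {
--         'equipment': None,
--         'voltage': None,
--         'class': None,
--         'topic': None
--     }
--
--     # Go through conversation in reverse to find most recent specifications
--     for msg in reversed(conversation_history):
--         if msg.get('role') == 'user':
--             content = msg.get('content', '').lower()
--
--             # Extract specifications - only update if not already found (most recent wins)
--             if not active_context['equipment']:
--                 for eq_type in ['gloves', 'blankets', 'sleeves', 'boots', 'overshoes', 'covers', 'matting', 'barriers']: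
--                     if eq_type in content:
--                         active_context['equipment'] = eq_type
--                         break
--
--             if not active_context['voltage']:
--                 if 'dc' in content and 'ac' not in content:
--                     active_context['voltage'] = 'DC'
--                 elif 'ac' in content and 'dc' not in content:
--                     active_context['voltage'] = 'AC'
--
--             if not active_context['class']:
--                 for class_num in ['class 0', 'class 1', 'class 2', 'class 3', 'class 4']:
--                     if class_num in content:
--                         active_context['class'] = class_num
--                         break
--
--             if not active_context['topic']:
--                 for topic in ['voltage', 'current', 'test', 'testing', 'inspection', 'maintenance', 'safety', 'standards', 'requirements']:
--                     if topic in content: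
--                         active_context['topic'] = topic
--                         break
--
--     return active_context
-- ===== SOURCE B (Python) =====
-- EQUIPMENT = ['gloves', 'blankets', 'sleeves', 'boots', 'overshoes', 'covers', 'matting', 'barriers']
-- CLASSES = ['class 0', 'class 1', 'class 2', 'class 3', 'class 4']
-- TOPICS = ['voltage', 'current', 'test', 'testing', 'inspection', 'maintenance', 'safety', 'standards', 'requirements']
--
--
-- def _keyword_picker(keywords):
--     def pick(content):
--         for k in keywords:
--             if k in content:
--                 return k
--         return None
--     return pick
--
--
-- def _voltage_picker(content):
--     dc, ac = 'dc' in content, 'ac' in content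
--     if dc and not ac:
--         return 'DC'
--     if ac and not dc:
--         return 'AC'
--     return None
--
--
-- def _latest(pick, contents):
--     for c in contents:
--         v = pick(c)
--         if v is not None:
--             return v
--     return None
--
--
-- def extract_active_context(conversation_history):
--     """Extract the active context that should be inherited"""
--     # stage 1: the lowercased user contents, most recent first
--     contents = [m.get('content', '').lower()
--                 for m in reversed(conversation_history) if m.get('role') == 'user']
--     # stage 2: each field independently takes its first (= most recent) match
--     return {
--         'equipment': _latest(_keyword_picker(EQUIPMENT), contents),
--         'voltage': _latest(_voltage_picker, contents),
--         'class': _latest(_keyword_picker(CLASSES), contents),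
--         'topic': _latest(_keyword_picker(TOPICS), contents),
--     }
-- ===== Notes on version B (the rewrite author's own statement) =====
-- stated objective: simpler
-- what changed: B replaces A's single reversed loop carrying four guarded mutable slots by two stages: it first extracts the lowercased user contents (most recent first), then computes each of the four fields independently as the first non-None pick over that list, via a shared first-match combinator instead of A's inline break-loops and 'if not already found' guards.
import Mathlib
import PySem

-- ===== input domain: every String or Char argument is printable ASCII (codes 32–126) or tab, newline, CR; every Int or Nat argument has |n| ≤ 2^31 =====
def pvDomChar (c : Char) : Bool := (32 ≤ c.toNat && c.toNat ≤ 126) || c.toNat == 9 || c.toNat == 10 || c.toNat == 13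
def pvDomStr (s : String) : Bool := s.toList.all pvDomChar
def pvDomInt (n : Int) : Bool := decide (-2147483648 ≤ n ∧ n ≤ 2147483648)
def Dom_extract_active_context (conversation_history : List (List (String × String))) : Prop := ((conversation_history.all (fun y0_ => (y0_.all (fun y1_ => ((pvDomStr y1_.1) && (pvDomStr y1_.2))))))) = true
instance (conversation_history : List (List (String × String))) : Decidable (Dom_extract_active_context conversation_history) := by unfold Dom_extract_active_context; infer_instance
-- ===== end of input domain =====

-- B replaces A's reversed loop over four guarded mutable slots by two stages: extract the
-- lowercased user contents (most recent first), then compute each field independently as the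
-- first non-none pick over that list (objective: simpler decomposition).

-- ===== PORT A =====
-- the keyword lists of the Python source (module-level constants in Source B, literals in A)
def pvEquipList : List String := ["gloves", "blankets", "sleeves", "boots", "overshoes", "covers", "matting", "barriers"]
def pvClassList : List String := ["class 0", "class 1", "class 2", "class 3", "class 4"]
def pvTopicList : List String := ["voltage", "current", "test", "testing", "inspection", "maintenance", "safety", "standards", "requirements"]

-- A's `for kw in L: if kw in content: assign; break` = first keyword contained in content
def pvFindKw (l : List String) (content : String) : Option String :=
  l.find? (fun kw => PySem.Str.isIn kw content)

-- A's AC/DC elif chain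
def pvVolt (content : String) : Option String :=
  if PySem.Str.isIn "dc" content && !(PySem.Str.isIn "ac" content) then some "DC"
  else if PySem.Str.isIn "ac" content && !(PySem.Str.isIn "dc" content) then some "AC"
  else none

-- one iteration of A's reversed loop: update each slot only if still None
def pvStepA (st : Option String × Option String × Option String × Option String)
    (msg : List (String × String)) :
    Option String × Option String × Option String × Option String :=
  if (PySem.Dict.mk msg).get? "role" == some "user" then
    let content := PySem.Str.lower ((PySem.Dict.mk msg).getD "content" "")
    (st.1.or (pvFindKw pvEquipList content),
     st.2.1.or (pvVolt content),
     st.2.2.1.or (pvFindKw pvClassList content),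
     st.2.2.2.or (pvFindKw pvTopicList content))
  else st

def extract_active_context (conversation_history : List (List (String × String))) : List (String × Option String) :=
  let st := conversation_history.reverse.foldl pvStepA (none, none, none, none)
  [("equipment", st.1), ("voltage", st.2.1), ("class", st.2.2.1), ("topic", st.2.2.2)]

-- ===== PORT B =====
-- Source B's _keyword_picker: explicit recursive first-match scan of the keyword list
def pvPickKw : List String → String → Option String
  | [], _ => none
  | k :: ks, c => if PySem.Str.isIn k c then some k else pvPickKw ks c

-- Source B's _voltage_picker
def pvPickVolt (c : String) : Option String :=
  match PySem.Str.isIn "dc" c, PySem.Str.isIn "ac" c with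
  | true, false => some "DC"
  | false, true => some "AC"
  | _, _ => none

-- Source B's stage 1: lowercased contents of user messages, most recent first
def pvContents (h : List (List (String × String))) : List String :=
  (h.filterMap (fun msg =>
    if (PySem.Dict.mk msg).get? "role" == some "user"
    then some (PySem.Str.lower ((PySem.Dict.mk msg).getD "content" ""))
    else none)).reverse

-- Source B's _latest: first non-None pick over the contents
def pvLatest (pick : String → Option String) : List String → Option String
  | [] => none
  | c :: cs =>
    match pick c with
    | some v => some v
    | none => pvLatest pick cs

def extract_active_context_alt (conversation_history : List (List (String × String))) : List (String × Option String) :=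
  let contents := pvContents conversation_history
  [("equipment", pvLatest (pvPickKw pvEquipList) contents),
   ("voltage", pvLatest pvPickVolt contents),
   ("class", pvLatest (pvPickKw pvClassList) contents),
   ("topic", pvLatest (pvPickKw pvTopicList) contents)]

-- ===== PRECONDITION & SPEC =====
def Spec_extract_active_context (conversation_history : List (List (String × String))) (out : List (String × Option String)) : Prop := out = extract_active_context_alt conversation_history
instance (conversation_history : List (List (String × String))) (out : List (String × Option String)) : Decidable (Spec_extract_active_context conversation_history out) := by unfold Spec_extract_active_context; infer_instance

-- ===== CLAIM (what is proved, stated in full; the proofs are below) =====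
def Claim_equal_extract_active_context : Prop := ∀ (conversation_history : List (List (String × String))), Dom_extract_active_context conversation_history → Spec_extract_active_context conversation_history (extract_active_context conversation_history)

-- ===== LEMMAS AND PROOFS =====

-- B's helpers compute the same candidates as A's
lemma pvPickKw_eq (l : List String) (c : String) : pvPickKw l c = pvFindKw l c := by
  induction l with
  | nil => rfl
  | cons k ks ih => simp [pvPickKw, pvFindKw, List.find?]; split <;> simp_all [pvFindKw]

lemma pvPickVolt_eq (c : String) : pvPickVolt c = pvVolt c := by
  unfold pvPickVolt pvVolt
  cases hd : PySem.Str.isIn "dc" c <;> cases ha : PySem.Str.isIn "ac" c <;> simp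

-- the per-message candidate quadruple (none on non-user messages)
def pvCand (msg : List (String × String)) :
    Option String × Option String × Option String × Option String :=
  if (PySem.Dict.mk msg).get? "role" == some "user" then
    let content := PySem.Str.lower ((PySem.Dict.mk msg).getD "content" "")
    (pvFindKw pvEquipList content, pvVolt content,
     pvFindKw pvClassList content, pvFindKw pvTopicList content)
  else (none, none, none, none)

lemma pvStepA_eq (st : Option String × Option String × Option String × Option String)
    (msg : List (String × String)) :
    pvStepA st msg = (st.1.or (pvCand msg).1, st.2.1.or (pvCand msg).2.1,
      st.2.2.1.or (pvCand msg).2.2.1, st.2.2.2.or (pvCand msg).2.2.2) := by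
  unfold pvStepA pvCand
  split <;> simp

-- pvLatest is findSome?
lemma pvLatest_eq (p : String → Option String) (l : List String) :
    pvLatest p l = l.findSome? p := by
  induction l with
  | nil => rfl
  | cons c cs ih => simp [pvLatest, List.findSome?_cons]; cases p c <;> simp [ih]

-- main invariant: A's reversed fold computes, per field, the first candidate of pvContents
lemma foldA_eq (xs : List (List (String × String))) :
    xs.reverse.foldl pvStepA (none, none, none, none) =
      ((pvContents xs).findSome? (pvFindKw pvEquipList),
       (pvContents xs).findSome? pvVolt,
       (pvContents xs).findSome? (pvFindKw pvClassList),
       (pvContents xs).findSome? (pvFindKw pvTopicList)) := by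
  rw [List.foldl_reverse]
  induction xs with
  | nil => rfl
  | cons m xs ih =>
      rw [List.foldr_cons, ih, pvStepA_eq]
      unfold pvCand
      by_cases h : (PySem.Dict.mk m).get? "role" = some "user"
      · have hc : pvContents (m :: xs) =
            pvContents xs ++ [PySem.Str.lower ((PySem.Dict.mk m).getD "content" "")] := by
          simp [pvContents, h]
        rw [hc]
        simp [h]
      · have hc : pvContents (m :: xs) = pvContents xs := by
          simp [pvContents, h]
        rw [hc]
        simp [h]

-- ===== VERDICT (by name: the statement is the Claim_ definition above) =====
theorem extract_active_context_spec : Claim_equal_extract_active_context := by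
  intro h _
  unfold Spec_extract_active_context extract_active_context extract_active_context_alt
  rw [foldA_eq]
  have e : ∀ l, pvPickKw l = pvFindKw l := fun l => funext (pvPickKw_eq l)
  have ev : pvPickVolt = pvVolt := funext pvPickVolt_eq
  simp [pvLatest_eq, e, ev]
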